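-- pv_equiv track=rewrite | github.com/lengthwisehems/retail2 | citizensofhumanity_inventory.py | normalize_product_title
-- ===== SOURCE A (Python) =====
-- def normalize_product_title(title: str) -> str:
--     lowered = title.lower()
--     if " in " not in lowered:
--         return title
--     prefix, sep, suffix = title.partition(" in ")
--     if not sep:
--         return title
--     tokens = prefix.split()
--     movers = {"petite", "reworked", "rework"}
--     moved = [token for token in tokens if token.lower() in movers]
--     kept = [token for token in tokens if token.lower() not in movers]
--     if not moved:
--         return title
--     moved_phrase = " ".join(moved)
--     prefix_out = " ".join(kept + moved).strip()
--     suffix_out = suffix.strip()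
--     return f"{prefix_out} in {suffix_out}"
-- ===== SOURCE B (Python) =====
-- def normalize_product_title(title: str) -> str:
--     if " in " not in title.lower():
--         return title
--     prefix, sep, suffix = title.partition(" in ")
--     if not sep:
--         return title
--     movers = {"petite", "reworked", "rework"}
--     tokens = prefix.split()
--     if not any(t.lower() in movers for t in tokens):
--         return title
--     ordered = sorted(tokens, key=lambda t: t.lower() in movers)
--     return f'{" ".join(ordered).strip()} in {suffix.strip()}'
-- ===== Notes on version B (the rewrite author's own statement) =====
-- stated objective: alternative
-- what changed: The two filtering comprehensions (kept, then moved) are replaced by one stable sort of the tokens keyed on being a mover word, which yields non-movers then movers each in original order in a single library call.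
import Mathlib
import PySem

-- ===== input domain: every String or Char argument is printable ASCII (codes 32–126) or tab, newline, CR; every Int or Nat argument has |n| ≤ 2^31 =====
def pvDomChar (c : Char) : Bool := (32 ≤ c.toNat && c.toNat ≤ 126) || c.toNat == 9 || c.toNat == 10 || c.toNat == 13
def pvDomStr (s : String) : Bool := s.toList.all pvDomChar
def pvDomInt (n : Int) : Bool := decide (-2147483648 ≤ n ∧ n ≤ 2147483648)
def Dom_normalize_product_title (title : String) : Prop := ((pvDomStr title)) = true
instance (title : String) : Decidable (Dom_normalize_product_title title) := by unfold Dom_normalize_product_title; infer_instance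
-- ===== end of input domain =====

-- B replaces the two filtering comprehensions (kept, then moved) of A by a single stable sort
-- keyed on "is a mover word"; same return value (alternative decomposition, no speed claim).

-- ===== PORT A =====
def normalize_product_title (title : String) : String :=
  let l := title.toList
  let lowered := PySem.Chars.lower l
  if PySem.Chars.isIn " in ".toList lowered = false then title
  else
    -- title.partition(" in "): find the first occurrence in the ORIGINAL string
    let i := PySem.Chars.find l " in ".toList
    if i = -1 then title  -- sep == "" : partition found nothing
    else
      let pre := l.take i.toNat
      let suf := l.drop (i.toNat + 4)
      let tokens := PySem.Chars.split₀ pre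
      let movers := ["petite".toList, "reworked".toList, "rework".toList]
      let moved := tokens.filter (fun t => movers.contains (PySem.Chars.lower t))
      let kept := tokens.filter (fun t => !(movers.contains (PySem.Chars.lower t)))
      if moved = [] then title
      else
        let prefix_out := PySem.Chars.strip (PySem.Chars.join " ".toList (kept ++ moved))
        let suffix_out := PySem.Chars.strip suf
        String.mk (prefix_out ++ " in ".toList ++ suffix_out)

-- ===== PORT B =====
def normalize_product_title_alt (title : String) : String :=
  let l := title.toList
  if PySem.Chars.isIn " in ".toList (PySem.Chars.lower l) = false then title
  else
    let i := PySem.Chars.find l " in ".toList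
    if i = -1 then title
    else
      let movers := ["petite".toList, "reworked".toList, "rework".toList]
      let tokens := PySem.Chars.split₀ (l.take i.toNat)
      if tokens.any (fun t => movers.contains (PySem.Chars.lower t)) = false then title
      else
        let ordered := PySem.List.sorted tokens
          (fun t => if movers.contains (PySem.Chars.lower t) then (1 : Int) else 0) false
        String.mk (PySem.Chars.strip (PySem.Chars.join " ".toList ordered)
          ++ " in ".toList ++ PySem.Chars.strip (l.drop (i.toNat + 4)))

-- ===== PRECONDITION & SPEC =====
def Spec_normalize_product_title (title : String) (out : String) : Prop := out = normalize_product_title_alt title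
instance (title : String) (out : String) : Decidable (Spec_normalize_product_title title out) := by unfold Spec_normalize_product_title; infer_instance

-- ===== CLAIM (what is proved, stated in full; the proofs are below) =====
def Claim_equal_normalize_product_title : Prop := ∀ (title : String), Dom_normalize_product_title title → Spec_normalize_product_title title (normalize_product_title title)

-- ===== LEMMAS AND PROOFS =====

-- insertBy with a comparison that never fires appends at the end
theorem pv_insertBy_last {α : Type} (bef : α → α → Bool) (x : α) (L : List α)
    (hL : ∀ a ∈ L, bef x a = false) :
    PySem.List.insertBy bef x L = L ++ [x] := by
  induction L with
  | nil => simp [PySem.List.insertBy]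
  | cons a as ih =>
    have := hL a (by simp)
    simp only [PySem.List.insertBy, this, Bool.false_eq_true, if_false, List.cons_append]
    exact congrArg _ (ih fun a ha => hL a (by simp [ha]))

-- insertBy places x after every element it is not "before" and in front of the rest
theorem pv_insertBy_split {α : Type} (bef : α → α → Bool) (x : α) (A B : List α)
    (hA : ∀ a ∈ A, bef x a = false) (hB : ∀ b ∈ B, bef x b = true) :
    PySem.List.insertBy bef x (A ++ B) = A ++ x :: B := by
  induction A with
  | nil =>
    cases B with
    | nil => simp [PySem.List.insertBy]
    | cons b bs => simp [PySem.List.insertBy, hB b (by simp)]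
  | cons a as ih =>
    have := hA a (by simp)
    simp only [List.cons_append, PySem.List.insertBy, this, Bool.false_eq_true, if_false]
    simpa using ih (fun a ha => hA a (by simp [ha]))

-- invariant of the insertion-sort fold with a 0/1 key
theorem pv_foldl_insert_split {α : Type} (p : α → Bool) (xs A B : List α)
    (hA : ∀ a ∈ A, p a = false) (hB : ∀ b ∈ B, p b = true) :
    xs.foldl (fun acc x => PySem.List.insertBy
        (fun a b => decide ((if p a then (1 : Int) else 0) < (if p b then (1 : Int) else 0))) x acc)
      (A ++ B)
    = (A ++ xs.filter (fun t => !p t)) ++ (B ++ xs.filter p) := by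
  induction xs generalizing A B with
  | nil => simp
  | cons x xs ih =>
    by_cases hx : p x = true
    · have hins : PySem.List.insertBy
          (fun a b => decide ((if p a then (1 : Int) else 0) < (if p b then (1 : Int) else 0))) x (A ++ B)
          = A ++ (B ++ [x]) := by
        rw [← List.append_assoc]
        apply pv_insertBy_last
        intro a ha
        rcases List.mem_append.mp ha with h | h
        · simp [hx, hA a h]
        · simp [hx, hB a h]
      simp only [List.foldl_cons, hins]
      rw [ih A (B ++ [x]) hA (by intro b hb
                                 rcases List.mem_append.mp hb with h | h
                                 · exact hB b h
                                 · simp at h; simpa [h] using hx)]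
      simp [hx]
    · have hx' : p x = false := by simpa using hx
      have hins : PySem.List.insertBy
          (fun a b => decide ((if p a then (1 : Int) else 0) < (if p b then (1 : Int) else 0))) x (A ++ B)
          = (A ++ [x]) ++ B := by
        rw [List.append_assoc]
        apply pv_insertBy_split
        · intro a ha; simp [hx', hA a ha]
        · intro b hb; simp [hx', hB b hb]
      simp only [List.foldl_cons, hins]
      rw [ih (A ++ [x]) B (by intro a ha
                              rcases List.mem_append.mp ha with h | h
                              · exact hA a h
                              · simp at h; simpa [h] using hx') hB]
      simp [hx']

-- a stable sort on a Boolean (0/1) key is filter-false ++ filter-true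
theorem pv_sorted_binary {α : Type} (p : α → Bool) (xs : List α) :
    PySem.List.sorted xs (fun t => if p t then (1 : Int) else 0) false
    = xs.filter (fun t => !p t) ++ xs.filter p := by
  rw [PySem.List.sorted_eq_foldl_insertBy]
  simpa using pv_foldl_insert_split p xs [] []
    (by intro a ha; simp at ha) (by intro b hb; simp at hb)

-- ===== VERDICT (by name: the statement is the Claim_ definition above) =====
theorem normalize_product_title_spec : Claim_equal_normalize_product_title := by
  intro title _
  unfold Spec_normalize_product_title normalize_product_title normalize_product_title_alt
  by_cases h1 : PySem.Chars.isIn " in ".toList (PySem.Chars.lower title.toList) = false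
  · rw [if_pos h1, if_pos h1]
  · rw [if_neg h1, if_neg h1]
    by_cases h2 : PySem.Chars.find title.toList " in ".toList = -1
    · rw [if_pos h2, if_pos h2]
    · rw [if_neg h2, if_neg h2]
      by_cases h3 : (PySem.Chars.split₀ (title.toList.take (PySem.Chars.find title.toList " in ".toList).toNat)).filter
          (fun t => (["petite".toList, "reworked".toList, "rework".toList]).contains (PySem.Chars.lower t)) = []
      · rw [if_pos h3, if_pos (by simpa [List.any_eq_false, List.filter_eq_nil_iff] using h3)]
      · rw [if_neg h3, if_neg (by simpa [List.any_eq_false, List.filter_eq_nil_iff] using h3)]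
        rw [pv_sorted_binary (fun t => (["petite".toList, "reworked".toList, "rework".toList]).contains (PySem.Chars.lower t))]
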